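-- pv_equiv track=rewrite | github.com/juanCabral-DJ/Simulaci-n-Monte-Carlo | parallel/run_parallel.py | row_chunks
-- ===== SOURCE A (Python) =====
-- from typing import List, Tuple
--
-- def row_chunks(rows: int, workers: int) -> List[Tuple[int, int]]:
--     workers = max(1, min(workers, rows))
--     base = rows // workers
--     remainder = rows % workers
--     chunks = []
--     start = 0
--     for worker in range(workers):
--         extra = 1 if worker < remainder else 0
--         end = start + base + extra
--         chunks.append((start, end))
--         start = end
--     return chunks
-- ===== SOURCE B (Python) =====
-- def row_chunks(rows: int, workers: int):
--     workers = max(1, min(workers, rows))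
--     base, remainder = divmod(rows, workers)
--     return [(i * base + min(i, remainder), (i + 1) * base + min(i + 1, remainder))
--             for i in range(workers)]
-- ===== Notes on version B (the rewrite author's own statement) =====
-- stated objective: simpler
-- what changed: Replaces the stateful loop carrying a running start accumulator with a closed-form comprehension computing each chunk's boundaries independently from its index (start_i = i*base + min(i, remainder)).
import Mathlib
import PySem

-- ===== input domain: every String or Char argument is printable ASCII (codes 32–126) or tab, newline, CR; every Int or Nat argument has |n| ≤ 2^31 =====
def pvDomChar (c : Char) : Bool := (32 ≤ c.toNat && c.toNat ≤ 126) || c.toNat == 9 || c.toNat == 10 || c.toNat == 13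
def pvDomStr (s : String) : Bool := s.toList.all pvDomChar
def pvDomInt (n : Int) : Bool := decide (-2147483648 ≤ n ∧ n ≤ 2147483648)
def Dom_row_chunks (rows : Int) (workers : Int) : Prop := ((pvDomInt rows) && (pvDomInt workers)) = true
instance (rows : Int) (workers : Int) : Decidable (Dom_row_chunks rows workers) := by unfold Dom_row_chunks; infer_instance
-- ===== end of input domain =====

-- B replaces the stateful running-start loop with a closed-form comprehension computing each
-- chunk's boundaries directly from its index (objective: simpler).

-- ===== PORT A =====
-- literal transliteration of A: a fold over range(workers) carrying (chunks, start)
def row_chunks (rows : Int) (workers : Int) : List (Int × Int) :=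
  let workers := max 1 (min workers rows)
  let base := PySem.Int.floordiv rows workers
  let remainder := PySem.Int.mod rows workers
  let st := (PySem.List.pyRange 0 workers 1).foldl
    (fun (acc : List (Int × Int) × Int) worker =>
      let extra : Int := if worker < remainder then 1 else 0
      let endv := acc.2 + base + extra
      (acc.1 ++ [(acc.2, endv)], endv))
    ([], 0)
  st.1

-- ===== PORT B =====
-- literal transliteration of B: each tuple computed independently from its index
def row_chunks_alt (rows : Int) (workers : Int) : List (Int × Int) :=
  let workers := max 1 (min workers rows)
  let base := PySem.Int.floordiv rows workers
  let remainder := PySem.Int.mod rows workers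
  (PySem.List.pyRange 0 workers 1).map
    (fun i => (i * base + min i remainder, (i + 1) * base + min (i + 1) remainder))

-- ===== PRECONDITION & SPEC =====
def Spec_row_chunks (rows : Int) (workers : Int) (out : List (Int × Int)) : Prop := out = row_chunks_alt rows workers
instance (rows : Int) (workers : Int) (out : List (Int × Int)) : Decidable (Spec_row_chunks rows workers out) := by unfold Spec_row_chunks; infer_instance

-- ===== CLAIM (what is proved, stated in full; the proofs are below) =====
def Claim_equal_row_chunks : Prop := ∀ (rows : Int) (workers : Int), Dom_row_chunks rows workers → Spec_row_chunks rows workers (row_chunks rows workers)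

-- ===== LEMMAS AND PROOFS =====

-- closed form of A's start accumulator
def pvF (b r i : Int) : Int := i * b + min i r

theorem pvF_step (b r : Int) (i : Int) :
    pvF b r (i + 1) = pvF b r i + b + (if i < r then 1 else 0) := by
  unfold pvF
  have hm : (i + 1) * b = i * b + b := by ring
  rw [hm]
  by_cases h : i < r <;> simp [h] <;> omega

theorem pv_loop (b r : Int) (hr : 0 ≤ r) (n : ℕ) :
    ((List.range n).map (fun k => Int.ofNat k)).foldl
      (fun (acc : List (Int × Int) × Int) worker =>
        let extra : Int := if worker < r then 1 else 0
        let endv := acc.2 + b + extra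
        (acc.1 ++ [(acc.2, endv)], endv))
      ([], 0)
    = ((List.range n).map (fun k => (pvF b r (Int.ofNat k), pvF b r (Int.ofNat k + 1))), pvF b r (Int.ofNat n)) := by
  induction n with
  | zero => simp [pvF]; omega
  | succ m ih =>
      rw [List.range_succ, List.map_append, List.map_append, List.foldl_append, ih]
      simp only [List.map_cons, List.map_nil, List.foldl_cons, List.foldl_nil]
      rw [← pvF_step b r (Int.ofNat m)]
      have : Int.ofNat (m + 1) = Int.ofNat m + 1 := by simp
      rw [this]

-- ===== VERDICT (by name: the statement is the Claim_ definition above) =====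
theorem row_chunks_spec : Claim_equal_row_chunks := by
  intro rows workers _
  unfold Spec_row_chunks
  simp only [row_chunks, row_chunks_alt]
  have hw : (0:Int) < max 1 (min workers rows) := by omega
  have hr : 0 ≤ PySem.Int.mod rows (max 1 (min workers rows)) :=
    PySem.Int.mod_nonneg rows hw
  rw [PySem.List.pyRange_one]
  simp only [Int.sub_zero, zero_add]
  have hmap : (List.range (max 1 (min workers rows)).toNat).map (fun k => ((k : ℕ) : Int))
      = (List.range (max 1 (min workers rows)).toNat).map (fun k => Int.ofNat k) := by
    simp [Int.ofNat_eq_natCast]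
  rw [hmap, pv_loop _ _ hr]
  simp [List.map_map, Function.comp, pvF]
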